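-- pv_equiv track=rewrite | github.com/yms020615/COSE102 | search.py | search
-- ===== SOURCE A (Python) =====
-- def search( inverted_indexing, sentences, query):
--     """ 사용자 쿼리를 받아 용례 검색 결과(문장)를 출력
--     inverted_indexing : 역색인 dictionary (key : index term, value : set of sentences)
--     sentences : 색인된 문장 리스트
--     query : 사용자 쿼리 (둘 이상의 단어가 포함된 쿼리는 각 단어의 용례 문장들의 교집합을 구해야 함)
--     return value: 검색된 문장 (번호) 리스트 (문장 번호 순)
--     """
--     q = query.rstrip().split()
--
--     if q[0] in inverted_indexing:
--         s = inverted_indexing[q[0]]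
--     else:
--         return list()
--
--     for i in q[1:]:
--
--         if i in inverted_indexing:
--             s = inverted_indexing[i] & s
--         else:
--             return list()
--
--         s = inverted_indexing[i] & s
--
--     return sorted(list(s))
-- ===== SOURCE B (Python) =====
-- def search(inverted_indexing, sentences, query):
--     words = list(dict.fromkeys(query.rstrip().split()))
--     if any(w not in inverted_indexing for w in words):
--         return []
--     counts = {}
--     for w in words:
--         for s in inverted_indexing[w]:
--             counts[s] = counts.get(s, 0) + 1
--     return sorted(s for s, c in counts.items() if c == len(words))
-- ===== Notes on version B (the rewrite author's own statement) =====
-- stated objective: alternative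
-- what changed: Replaces A's sequential pairwise set-intersection over the query words with a single scan-and-count pass: dedup the query words, count for each sentence in how many posting lists it occurs, and keep those whose count equals the number of distinct words.
import Mathlib
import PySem

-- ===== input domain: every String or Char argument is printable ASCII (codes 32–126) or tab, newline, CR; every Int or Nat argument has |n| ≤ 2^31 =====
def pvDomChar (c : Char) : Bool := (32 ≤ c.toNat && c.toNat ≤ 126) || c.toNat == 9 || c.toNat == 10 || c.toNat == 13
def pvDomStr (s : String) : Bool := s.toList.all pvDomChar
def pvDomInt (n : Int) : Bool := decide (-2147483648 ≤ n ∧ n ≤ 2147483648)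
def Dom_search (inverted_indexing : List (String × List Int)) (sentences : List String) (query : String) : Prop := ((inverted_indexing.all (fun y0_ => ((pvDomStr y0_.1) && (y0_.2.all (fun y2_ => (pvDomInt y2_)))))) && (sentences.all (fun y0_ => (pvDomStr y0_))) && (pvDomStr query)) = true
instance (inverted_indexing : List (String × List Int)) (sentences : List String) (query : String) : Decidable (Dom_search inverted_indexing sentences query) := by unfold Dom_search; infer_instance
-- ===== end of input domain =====

-- B replaces A's pairwise set-intersections with one count-per-sentence pass over the
-- distinct query words' posting lists (objective: alternative; equivalence of the RETURN value).

-- ===== PORT A =====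
-- the 'for i in q[1:]' loop of A, with its early 'return list()' modelled as 'none'
def searchLoop (inv : List (String × List Int)) : List String → List Int → Option (List Int)
  | [], s => some s
  | i :: rest, s =>
    match (PySem.Dict.mk inv).get? i with
    | some t => searchLoop inv rest (PySem.Set.inter t (PySem.Set.inter t s))  -- A intersects twice: s = inv[i] & s ; s = inv[i] & s
    | none => none

def search (inverted_indexing : List (String × List Int)) (sentences : List String) (query : String) : List Int :=
  match PySem.Str.split₀ (PySem.Str.rstrip query) with
  | [] => []  -- Python raises IndexError on q[0] here; excluded by Pre_search
  | w0 :: rest =>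
    match (PySem.Dict.mk inverted_indexing).get? w0 with
    | none => []
    | some s0 =>
      match searchLoop inverted_indexing rest s0 with
      | none => []
      | some s => PySem.List.sorted s (fun x => x) false

-- ===== PORT B =====
def search_alt (inverted_indexing : List (String × List Int)) (sentences : List String) (query : String) : List Int :=
  let words := PySem.List.dedup (PySem.Str.split₀ (PySem.Str.rstrip query))
  if words.any (fun w => ((PySem.Dict.mk inverted_indexing).get? w).isNone) then []
  else
    let counts : PySem.Dict Int Int := words.foldl
      (fun d w => (((PySem.Dict.mk inverted_indexing).get? w).getD []).foldl
        (fun d s => d.insert s (d.getD s 0 + 1)) d)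
      PySem.Dict.empty
    PySem.List.sorted ((counts.items.filter (fun p => p.2 == (words.length : Int))).map Prod.fst) (fun x => x) false

-- ===== PRECONDITION & SPEC =====
-- Pre_ excludes (a) whitespace-only queries, on which A raises IndexError at q[0], and
-- (b) value lists with duplicate elements, which encode no Python input at all: in Python the
-- dict values are SETS, so every real input satisfies the Nodup condition.
def Pre_search (inverted_indexing : List (String × List Int)) (sentences : List String) (query : String) : Prop :=
  PySem.Str.split₀ (PySem.Str.rstrip query) ≠ [] ∧ ∀ p ∈ inverted_indexing, p.2.Nodup
instance (inverted_indexing : List (String × List Int)) (sentences : List String) (query : String) : Decidable (Pre_search inverted_indexing sentences query) := by unfold Pre_search; infer_instance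

def pvWitness_search : (List (String × List Int)) × List String × String :=
  ([("a", [2, 1]), ("b", [1, 3])], ["x"], "a b")

def Spec_search (inverted_indexing : List (String × List Int)) (sentences : List String) (query : String) (out : List Int) : Prop := out = search_alt inverted_indexing sentences query
instance (inverted_indexing : List (String × List Int)) (sentences : List String) (query : String) (out : List Int) : Decidable (Spec_search inverted_indexing sentences query out) := by unfold Spec_search; infer_instance

-- ===== CLAIM (what is proved, stated in full; the proofs are below) =====
def Claim_equal_search : Prop := ∀ (inverted_indexing : List (String × List Int)) (sentences : List String) (query : String), Dom_search inverted_indexing sentences query → Pre_search inverted_indexing sentences query → Spec_search inverted_indexing sentences query (search inverted_indexing sentences query)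

-- ===== LEMMAS AND PROOFS =====

-- the value found by a dict lookup is one of the association list's values
lemma get?_value_nodup (inv : List (String × List Int)) (hN : ∀ p ∈ inv, p.2.Nodup)
    {w : String} {t : List Int} (h : (PySem.Dict.mk inv).get? w = some t) : t.Nodup := by
  have := PySem.Dict.mem_items_of_get?_eq_some _ h
  exact hN (w, t) this

lemma loop_none (inv : List (String × List Int)) :
    ∀ (ws : List String) (s : List Int),
      (∃ w ∈ ws, (PySem.Dict.mk inv).get? w = none) → searchLoop inv ws s = none := by
  intro ws
  induction ws with
  | nil => rintro s ⟨w, hw, _⟩; cases hw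
  | cons i rest ih =>
    rintro s ⟨w, hw, hnone⟩
    simp only [searchLoop]
    cases hg : (PySem.Dict.mk inv).get? i with
    | none => rfl
    | some t =>
      rcases List.mem_cons.mp hw with rfl | hw'
      · rw [hg] at hnone; cases hnone
      · exact ih _ ⟨w, hw', hnone⟩

lemma loop_spec (inv : List (String × List Int)) (hN : ∀ p ∈ inv, p.2.Nodup) :
    ∀ (ws : List String) (s : List Int), s.Nodup →
      (∀ w ∈ ws, ((PySem.Dict.mk inv).get? w).isSome) →
      ∃ r, searchLoop inv ws s = some r ∧ r.Nodup ∧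
        (∀ x, x ∈ r ↔ x ∈ s ∧ ∀ w ∈ ws, x ∈ ((PySem.Dict.mk inv).get? w).getD []) := by
  intro ws
  induction ws with
  | nil => intro s hs _; exact ⟨s, rfl, hs, by simp⟩
  | cons i rest ih =>
    intro s hs hall
    have hi := hall i List.mem_cons_self
    cases hg : (PySem.Dict.mk inv).get? i with
    | none => rw [hg] at hi; simp at hi
    | some t =>
      have ht : t.Nodup := get?_value_nodup inv hN hg
      obtain ⟨r, hr, hrn, hrm⟩ := ih (PySem.Set.inter t (PySem.Set.inter t s))
        (PySem.Set.nodup_inter _ _ ht)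
        (fun w hw => hall w (List.mem_cons_of_mem _ hw))
      refine ⟨r, ?_, hrn, ?_⟩
      · simp only [searchLoop]; rw [hg]; exact hr
      · intro x
        rw [hrm x]
        simp only [PySem.Set.mem_inter]
        constructor
        · rintro ⟨⟨hxt, _, hxs⟩, hrest⟩
          refine ⟨hxs, fun w hw => ?_⟩
          rcases List.mem_cons.mp hw with rfl | hw'
          · rw [hg]; simpa using hxt
          · exact hrest w hw'
        · rintro ⟨hxs, hall2⟩
          have hxt : x ∈ t := by
            have := hall2 i List.mem_cons_self
            rw [hg] at this; simpa using this
          exact ⟨⟨hxt, hxt, hxs⟩, fun w hw => hall2 w (List.mem_cons_of_mem _ hw)⟩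

lemma counts_getD (inv : List (String × List Int)) :
    ∀ (ws : List String) (d : PySem.Dict Int Int) (x : Int),
      (ws.foldl (fun d w => (((PySem.Dict.mk inv).get? w).getD []).foldl
          (fun d s => d.insert s (d.getD s 0 + 1)) d) d).getD x 0
        = d.getD x 0 + (ws.map (fun w => ((((PySem.Dict.mk inv).get? w).getD []).count x : Int))).sum := by
  intro ws
  induction ws with
  | nil => intro d x; simp
  | cons w rest ih =>
    intro d x
    simp only [List.foldl_cons, List.map_cons, List.sum_cons]
    rw [ih, PySem.Dict.getD_foldl_insert_add_one]
    ring

lemma counts_keys_nodup (inv : List (String × List Int)) :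
    ∀ (ws : List String) (d : PySem.Dict Int Int), d.keys.Nodup →
      (ws.foldl (fun d w => (((PySem.Dict.mk inv).get? w).getD []).foldl
          (fun d s => d.insert s (d.getD s 0 + 1)) d) d).keys.Nodup := by
  intro ws
  induction ws with
  | nil => intro d h; exact h
  | cons w rest ih =>
    intro d h
    exact ih _ (PySem.Dict.nodup_keys_foldl_insert _ _ _ h)

lemma counts_keys_mem (inv : List (String × List Int)) :
    ∀ (ws : List String) (d : PySem.Dict Int Int) (x : Int),
      (x ∈ (ws.foldl (fun d w => (((PySem.Dict.mk inv).get? w).getD []).foldl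
          (fun d s => d.insert s (d.getD s 0 + 1)) d) d).keys)
        ↔ x ∈ d.keys ∨ ∃ w ∈ ws, x ∈ ((PySem.Dict.mk inv).get? w).getD [] := by
  intro ws
  induction ws with
  | nil => intro d x; simp
  | cons w rest ih =>
    intro d x
    simp only [List.foldl_cons]
    rw [ih, PySem.Dict.keys_foldl_insert]
    simp only [PySem.Set.mem_update, List.exists_mem_cons_iff]
    tauto

-- a sum of counts over Nodup lists is the number of lists, exactly when x lies in every list
lemma sum_counts_eq_length_iff (x : Int) : ∀ (ps : List (List Int)), (∀ t ∈ ps, t.Nodup) →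
    (0 ≤ (ps.map (fun t => (t.count x : Int))).sum ∧
     (ps.map (fun t => (t.count x : Int))).sum ≤ ps.length ∧
     ((ps.map (fun t => (t.count x : Int))).sum = ps.length ↔ ∀ t ∈ ps, x ∈ t)) := by
  intro ps
  induction ps with
  | nil => intro _; simp
  | cons t rest ih =>
    intro h
    obtain ⟨h0, h1, h2⟩ := ih (fun u hu => h u (List.mem_cons_of_mem _ hu))
    have htn := h t List.mem_cons_self
    have hc1 : t.count x ≤ 1 := List.nodup_iff_count_le_one.mp htn x
    have hcm : x ∈ t ↔ t.count x = 1 :=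
      ⟨fun hm => List.count_eq_one_of_mem htn hm, fun he => List.count_pos_iff.mp (by omega)⟩
    simp only [List.map_cons, List.sum_cons, List.length_cons, List.mem_cons]
    refine ⟨by omega, by push_cast; omega, ?_⟩
    constructor
    · intro he
      have hc : t.count x = 1 := by push_cast at he; omega
      have hs : (rest.map (fun t => (t.count x : Int))).sum = rest.length := by push_cast at he ⊢; omega
      exact fun u hu => by rcases hu with rfl | hu; exacts [hcm.mpr hc, h2.mp hs u hu]
    · intro hall
      have hc := hcm.mp (hall t (Or.inl rfl))
      have hs := h2.mpr (fun u hu => hall u (Or.inr hu))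
      push_cast
      omega

-- ===== VERDICT (by name: the statement is the Claim_ definition above) =====
theorem search_spec : Claim_equal_search := by
  intro inv sents query _ hpre
  obtain ⟨hq, hN⟩ := hpre
  have hpost : ∀ w : String, (((PySem.Dict.mk inv).get? w).getD []).Nodup := by
    intro w
    cases hg : (PySem.Dict.mk inv).get? w with
    | none => simp
    | some t => simpa using get?_value_nodup inv hN hg
  unfold Spec_search search search_alt
  cases hsplit : PySem.Str.split₀ (PySem.Str.rstrip query) with
  | nil => exact absurd hsplit hq
  | cons w0 rest =>
    show (match (PySem.Dict.mk inv).get? w0 with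
          | none => ([] : List Int)
          | some s0 =>
            match searchLoop inv rest s0 with
            | none => ([] : List Int)
            | some s => PySem.List.sorted s (fun x => x)) =
        (if ((PySem.List.dedup (w0 :: rest)).any fun w => ((PySem.Dict.mk inv).get? w).isNone) = true
          then ([] : List Int)
          else PySem.List.sorted
            ((((PySem.List.dedup (w0 :: rest)).foldl
                (fun d w => (((PySem.Dict.mk inv).get? w).getD []).foldl
                  (fun d s => d.insert s (d.getD s 0 + 1)) d)
                PySem.Dict.empty).items.filter
              (fun p => p.2 == ((PySem.List.dedup (w0 :: rest)).length : Int))).map Prod.fst)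
            (fun x => x))
    by_cases hmiss : ∃ w ∈ w0 :: rest, (PySem.Dict.mk inv).get? w = none
    · have hany : ((PySem.List.dedup (w0 :: rest)).any fun w => ((PySem.Dict.mk inv).get? w).isNone) = true := by
        rw [List.any_eq_true]
        obtain ⟨w, hw, hnone⟩ := hmiss
        exact ⟨w, (PySem.List.mem_dedup _ _).mpr hw, by simp [hnone]⟩
      rw [hany, if_pos rfl]
      cases hg : (PySem.Dict.mk inv).get? w0 with
      | none => rfl
      | some s0 =>
        have hln : searchLoop inv rest s0 = none := by
          apply loop_none
          obtain ⟨w, hw, hnone⟩ := hmiss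
          rcases List.mem_cons.mp hw with rfl | hw'
          · rw [hg] at hnone; cases hnone
          · exact ⟨w, hw', hnone⟩
        show (match searchLoop inv rest s0 with
              | none => ([] : List Int)
              | some s => PySem.List.sorted s (fun x => x)) = []
        rw [hln]
    · push Not at hmiss
      have hall : ∀ w ∈ w0 :: rest, ((PySem.Dict.mk inv).get? w).isSome :=
        fun w hw => Option.ne_none_iff_isSome.mp (hmiss w hw)
      have hany : ((PySem.List.dedup (w0 :: rest)).any fun w => ((PySem.Dict.mk inv).get? w).isNone) = false := by
        rw [List.any_eq_false]
        intro w hw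
        simp only [Option.isNone_iff_eq_none]
        exact hmiss w ((PySem.List.mem_dedup _ _).mp hw)
      rw [hany]
      simp only [Bool.false_eq_true, if_false]
      obtain ⟨s0, hg⟩ := Option.isSome_iff_exists.mp (hall w0 List.mem_cons_self)
      have hs0 : s0.Nodup := get?_value_nodup inv hN hg
      obtain ⟨r, hr, hrn, hrm⟩ :=
        loop_spec inv hN rest s0 hs0 (fun w hw => hall w (List.mem_cons_of_mem _ hw))
      rw [hg]
      show (match searchLoop inv rest s0 with
            | none => ([] : List Int)
            | some s => PySem.List.sorted s (fun x => x)) = _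
      rw [hr]
      show PySem.List.sorted r (fun x => x) = _
      set words := PySem.List.dedup (w0 :: rest) with hwordsdef
      set counts : PySem.Dict Int Int := words.foldl
          (fun d w => (((PySem.Dict.mk inv).get? w).getD []).foldl
            (fun d s => d.insert s (d.getD s 0 + 1)) d)
          PySem.Dict.empty with hcountsdef
      have hkeysnd : counts.keys.Nodup := by
        rw [hcountsdef]
        exact counts_keys_nodup inv words PySem.Dict.empty
          (by rw [PySem.Dict.keys_empty]; exact List.nodup_nil)
      have hBL : ((counts.items.filter (fun p => p.2 == (words.length : Int))).map Prod.fst)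
          = counts.keys.filter (fun k => counts.getD k 0 == (words.length : Int)) := by
        rw [PySem.Dict.items_eq_map_keys counts hkeysnd 0, List.filter_map, List.map_map]
        exact List.map_id _
      rw [hBL]
      have hpw0 : ((PySem.Dict.mk inv).get? w0).getD [] = s0 := by rw [hg]; rfl
      have hw0mem : w0 ∈ words := (PySem.List.mem_dedup _ _).mpr List.mem_cons_self
      have hmem : ∀ x, x ∈ r ↔ x ∈ counts.keys.filter (fun k => counts.getD k 0 == (words.length : Int)) := by
        intro x
        rw [List.mem_filter]
        have hk := counts_keys_mem inv words PySem.Dict.empty x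
        rw [PySem.Dict.keys_empty] at hk
        have hg2 := counts_getD inv words PySem.Dict.empty x
        rw [PySem.Dict.getD_empty, zero_add] at hg2
        obtain ⟨hb0, hb1, hb2⟩ := sum_counts_eq_length_iff x
          (words.map (fun w => ((PySem.Dict.mk inv).get? w).getD []))
          (by intro t ht; obtain ⟨w, _, rfl⟩ := List.mem_map.mp ht; exact hpost w)
        simp only [List.map_map, List.length_map, List.forall_mem_map] at hb0 hb1 hb2
        have hAmem : x ∈ r ↔ ∀ w ∈ words, x ∈ ((PySem.Dict.mk inv).get? w).getD [] := by
          rw [hrm x]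
          constructor
          · rintro ⟨hxs, hrest⟩ w hw
            rcases List.mem_cons.mp ((PySem.List.mem_dedup _ _).mp hw) with rfl | hw2
            · rw [hpw0]; exact hxs
            · exact hrest w hw2
          · intro hallw
            refine ⟨?_, fun w hw => hallw w ((PySem.List.mem_dedup _ _).mpr (List.mem_cons_of_mem _ hw))⟩
            have := hallw w0 hw0mem
            rw [hpw0] at this; exact this
        rw [hAmem]
        constructor
        · intro hallw
          refine ⟨?_, ?_⟩
          · rw [hk]
            exact Or.inr ⟨w0, hw0mem, hallw w0 hw0mem⟩
          · rw [beq_iff_eq, hg2]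
            exact hb2.mpr hallw
        · rintro ⟨_, hbeq⟩
          rw [beq_iff_eq, hg2] at hbeq
          exact hb2.mp hbeq
      exact PySem.List.sorted_eq_sorted_of_perm r _ (fun x => x) (fun a b h => h)
        ((List.perm_ext_iff_of_nodup hrn (hkeysnd.filter _)).mpr hmem)
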